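-- pv_equiv track=rewrite | github.com/Yakumo625/algorithm | 4_Math/acwing 3792. 质数问题.py | func
-- ===== SOURCE A (Python) =====
-- def func(n, k):
-- 	primes, is_prime = [], [1 for _ in range(n + 1)]
-- 	for i in range(2, n + 1):
-- 		if is_prime[i]: primes.append(i)
-- 		for j in range(len(primes)):
-- 			c = primes[j] * i
-- 			if c > n: break
-- 			is_prime[c] = 0
-- 			if i % primes[j] == 0: break
-- 	d, cnt = set(primes), 0
-- 	for i in range(1, len(primes)):
-- 		if (primes[i - 1] + primes[i] + 1) in d: cnt += 1
-- 	return cnt >= k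
-- ===== SOURCE B (Python) =====
-- def _has_no_small_prime_factor(i, primes):
--     # primes is the ascending list of all primes below i
--     for p in primes:
--         if p * p > i:
--             break
--         if i % p == 0:
--             return False
--     return True
--
-- def func(n, k):
--     primes = []
--     for i in range(2, n + 1):
--         if _has_no_small_prime_factor(i, primes):
--             primes.append(i)
--     s = set(primes)
--     cnt = sum(1 for a, b in zip(primes, primes[1:]) if a + b + 1 in s)
--     return cnt >= k
-- ===== Notes on version B (the rewrite author's own statement) =====
-- stated objective: simpler
-- what changed: The linear (Euler) sieve with its is_prime marking array is replaced by direct trial division of each candidate by the already-found primes up to its square root (no array at all), and the consecutive-pair count uses a zip over adjacent pairs instead of an index loop.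
import Mathlib
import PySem

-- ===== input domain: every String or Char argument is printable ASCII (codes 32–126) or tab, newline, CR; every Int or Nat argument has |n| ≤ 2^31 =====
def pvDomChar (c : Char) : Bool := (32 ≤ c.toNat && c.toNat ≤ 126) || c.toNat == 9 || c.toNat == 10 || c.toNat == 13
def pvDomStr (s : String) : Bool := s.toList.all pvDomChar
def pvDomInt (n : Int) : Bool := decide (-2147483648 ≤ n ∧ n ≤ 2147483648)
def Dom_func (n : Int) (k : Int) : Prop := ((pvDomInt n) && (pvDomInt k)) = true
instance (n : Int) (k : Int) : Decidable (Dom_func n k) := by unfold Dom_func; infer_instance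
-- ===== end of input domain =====

-- B replaces A's linear (Euler) sieve + marking array by trial division by the found primes
-- up to √i, and counts the consecutive pair sums with a zip instead of an index loop (simpler).

-- ===== PORT A =====
-- inner 'for j in range(len(primes))' loop of A, with its two breaks
def pvInnerA (n i : Int) : List Int → List Int → List Int
  | [], is_prime => is_prime
  | p :: ps, is_prime =>
    if p * i > n then is_prime
    else
      -- is_prime[c] = 0 : the index c = p*i satisfies 0 ≤ c ≤ n here, so pySetD is exact
      let m := PySem.List.pySetD is_prime (p * i) 0
      if PySem.Int.mod i p = 0 then m else pvInnerA n i ps m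

-- one iteration of A's outer loop (is_prime[i] holds 0/1, truthiness = ≠ 0; index i in range)
def pvStepA (n : Int) (st : List Int × List Int) (i : Int) : List Int × List Int :=
  let primes := if PySem.List.pyGetD st.2 i 0 ≠ 0 then st.1 ++ [i] else st.1
  (primes, pvInnerA n i primes st.2)

def func (n : Int) (k : Int) : Bool :=
  let st := (PySem.List.pyRange 2 (n+1) 1).foldl (pvStepA n)
      ([], (PySem.List.pyRange 0 (n+1) 1).map (fun _ => (1 : Int)))
  let primes := st.1
  let d : PySem.Set Int := PySem.Set.ofList primes
  let cnt := (PySem.List.pyRange 1 (primes.length : Int) 1).foldl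
      (fun cnt i =>
        if PySem.Set.contains d
            (PySem.List.pyGetD primes (i-1) 0 + PySem.List.pyGetD primes i 0 + 1)
        then cnt + 1 else cnt) (0 : Int)
  decide (cnt ≥ k)

-- ===== PORT B =====
def pvNoSmallFactor (i : Int) : List Int → Bool
  | [] => true
  | p :: ps =>
    if p * p > i then true
    else if PySem.Int.mod i p = 0 then false
    else pvNoSmallFactor i ps

def func_alt (n : Int) (k : Int) : Bool :=
  let primes := (PySem.List.pyRange 2 (n+1) 1).foldl
      (fun primes i => if pvNoSmallFactor i primes then primes ++ [i] else primes)
      ([] : List Int)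
  let s : PySem.Set Int := PySem.Set.ofList primes
  let cnt := (primes.zip (primes.drop 1)).foldl
      (fun cnt ab => cnt + (if PySem.Set.contains s (ab.1 + ab.2 + 1) then (1:Int) else 0))
      (0 : Int)
  decide (cnt ≥ k)

-- ===== PRECONDITION & SPEC =====
def Spec_func (n : Int) (k : Int) (out : Bool) : Prop := out = func_alt n k
instance (n : Int) (k : Int) (out : Bool) : Decidable (Spec_func n k out) := by unfold Spec_func; infer_instance

-- ===== CLAIM (what is proved, stated in full; the proofs are below) =====
def Claim_equal_func : Prop := ∀ (n : Int) (k : Int), Dom_func n k → Spec_func n k (func n k)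

-- ===== LEMMAS AND PROOFS =====

-- x is prime (as a Python nonnegative int)
def pvIsP (x : Int) : Bool := decide (Nat.Prime x.toNat)

-- the primes in [2, I], ascending
def pvPrimesTo (I : Int) : List Int := (PySem.List.pyRange 2 (I+1) 1).filter pvIsP

-- the is_prime array over [0, n] with exactly the x satisfying P marked 0
def pvMask (n : Int) (P : Int → Bool) : List Int :=
  (PySem.List.pyRange 0 (n+1) 1).map (fun x => if P x then 0 else 1)

-- x is marked after A's outer iterations 2..I : x composite with x/minFac(x) ≤ I
def pvMarked (I : Int) (x : Int) : Bool :=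
  decide (2 ≤ x ∧ ¬ Nat.Prime x.toNat ∧ ((x.toNat / x.toNat.minFac : Nat) : Int) ≤ I)

-- the values marked by one run of A's inner loop over the list l
def pvMarkList (n i : Int) : List Int → List Int
  | [] => []
  | p :: ps =>
    if p * i > n then []
    else if PySem.Int.mod i p = 0 then [p * i]
    else (p * i) :: pvMarkList n i ps

theorem pvMask_congr {n : Int} {P Q : Int → Bool}
    (h : ∀ x, 0 ≤ x → x ≤ n → P x = Q x) : pvMask n P = pvMask n Q := by
  unfold pvMask
  apply List.map_congr_left
  intro x hx
  rw [PySem.List.mem_pyRange_one] at hx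
  rw [h x hx.1 (by omega)]

theorem pyGetD_pvMask {n i : Int} (P : Int → Bool) (h0 : 0 ≤ i) (h1 : i ≤ n) :
    PySem.List.pyGetD (pvMask n P) i 0 = (if P i then 0 else 1) := by
  unfold pvMask
  rw [PySem.List.pyGetD_map_pyRange_of_nonneg _ (n+1) i 0 h0 (by omega)]

theorem pySetD_pvMask {n c : Int} (P : Int → Bool) (h0 : 0 ≤ c) :
    PySem.List.pySetD (pvMask n P) c 0 = pvMask n (fun x => x == c || P x) := by
  rw [PySem.List.pySetD_of_nonneg (pvMask n P) (0:Int) h0]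
  unfold pvMask
  apply List.ext_getElem
  · simp
  · intro j hj hj2
    simp only [List.getElem_set, List.getElem_map, PySem.List.getElem_pyRange_one]
    simp only [List.length_map, PySem.List.length_pyRange_one] at hj2
    by_cases hc : c.toNat = j
    · have : (0:Int) + (j:Int) = c := by omega
      simp [hc, this]
    · have hne : ¬ ((j:Int) = c) := by omega
      simp [hc, hne]

theorem pvInnerA_mask {n i : Int} (hi : 2 ≤ i) (l : List Int) (P : Int → Bool)
    (hl : ∀ p ∈ l, 2 ≤ p) :
    pvInnerA n i l (pvMask n P) = pvMask n (fun x => P x || (pvMarkList n i l).contains x) := by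
  induction l generalizing P with
  | nil =>
    simp only [pvInnerA, pvMarkList]
    apply pvMask_congr; intro x _ _; simp
  | cons p ps ih =>
    have hp : 2 ≤ p := hl p (by simp)
    have hpi0 : 0 ≤ p * i := by positivity
    simp only [pvInnerA, pvMarkList]
    by_cases h1 : p * i > n
    · simp only [if_pos h1]
      apply pvMask_congr; intro x _ _; simp
    · simp only [if_neg h1]
      rw [pySetD_pvMask P hpi0]
      by_cases h2 : PySem.Int.mod i p = 0
      · simp only [if_pos h2]
        apply pvMask_congr; intro x _ _
        by_cases hx : x = p * i <;> simp [hx, Bool.or_comm]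
      · simp only [if_neg h2]
        rw [ih (fun x => x == p * i || P x) (fun q hq => hl q (by simp [hq]))]
        apply pvMask_congr; intro x _ _
        by_cases hx : x = p * i
        · simp [hx]
        · have hb : (x == p * i) = false := by simpa using hx
          simp [hb, hx]

theorem pvMarkList_mem {n i : Int} (hi : 2 ≤ i) :
    ∀ (k : Nat) (a : Int), 1 ≤ a → a ≤ (i.toNat.minFac : Int) → ((i.toNat.minFac : Int) - a).toNat = k →
    ∀ x : Int,
    (x ∈ pvMarkList n i (((PySem.List.pyRange a (i+1) 1)).filter pvIsP) ↔
      ∃ q : Int, pvIsP q ∧ a ≤ q ∧ q ≤ (i.toNat.minFac : Int) ∧ q * i ≤ n ∧ x = q * i) := by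
  have hFp : Nat.Prime i.toNat.minFac := Nat.minFac_prime (by omega)
  have hF2 : 2 ≤ i.toNat.minFac := hFp.two_le
  have hFle : i.toNat.minFac ≤ i.toNat := Nat.minFac_le (by omega)
  have hFdvdN : i.toNat.minFac ∣ i.toNat := Nat.minFac_dvd _
  have hFdvd : (i.toNat.minFac : Int) ∣ i := by
    have : i = (i.toNat : Int) := by omega
    rw [this]; exact_mod_cast hFdvdN
  intro k
  induction k with
  | zero =>
    intro a ha1 haF hk x
    have haF' : a = (i.toNat.minFac : Int) := by omega
    have hcons : PySem.List.pyRange a (i+1) 1 = a :: PySem.List.pyRange (a+1) (i+1) 1 :=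
      PySem.List.pyRange_one_cons (by omega)
    have hap : pvIsP a = true := by
      simp only [pvIsP, haF', decide_eq_true_eq]
      simpa using hFp
    rw [hcons, List.filter_cons, if_pos hap]
    by_cases hni : a * i > n
    · simp only [pvMarkList, if_pos hni]
      simp only [List.not_mem_nil, false_iff]
      rintro ⟨q, hq, haq, hqF, hqn, rfl⟩
      have : a * i ≤ q * i := by
        apply mul_le_mul_of_nonneg_right haq (by omega)
      omega
    · have hd : PySem.Int.mod i a = 0 := by
        rw [PySem.Int.mod_eq_zero_iff_dvd]
        rw [haF']; exact hFdvd
      simp only [pvMarkList, if_neg hni, if_pos hd]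
      simp only [List.mem_singleton]
      constructor
      · rintro rfl
        exact ⟨a, hap, le_refl a, by omega, by omega, rfl⟩
      · rintro ⟨q, hq, haq, hqF, hqn, rfl⟩
        have : q = a := by omega
        rw [this]
  | succ k ih =>
    intro a ha1 haF hk x
    have haltF : a < (i.toNat.minFac : Int) := by omega
    have hcons : PySem.List.pyRange a (i+1) 1 = a :: PySem.List.pyRange (a+1) (i+1) 1 :=
      PySem.List.pyRange_one_cons (by omega)
    rw [hcons, List.filter_cons]
    by_cases hap : pvIsP a = true
    · rw [if_pos hap]
      by_cases hni : a * i > n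
      · simp only [pvMarkList, if_pos hni]
        simp only [List.not_mem_nil, false_iff]
        rintro ⟨q, hq, haq, hqF, hqn, rfl⟩
        have : a * i ≤ q * i := mul_le_mul_of_nonneg_right haq (by omega)
        omega
      · by_cases hd : PySem.Int.mod i a = 0
        · -- a divides i, so a = minFac i, contradicting a < minFac i
          exfalso
          have hdvd : a ∣ i := (PySem.Int.mod_eq_zero_iff_dvd i a).mp hd
          have hdvdN : a.toNat ∣ i.toNat := by
            have h1 : a = (a.toNat : Int) := by omega
            have h2 : i = (i.toNat : Int) := by omega
            rw [h1, h2] at hdvd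
            exact_mod_cast hdvd
          have h2a : 2 ≤ a.toNat := by
            have := (decide_eq_true_eq.mp hap).two_le
            omega
          have := Nat.minFac_le_of_dvd h2a hdvdN
          omega
        · simp only [pvMarkList, if_neg hni, if_neg hd, List.mem_cons]
          rw [ih (a+1) (by omega) (by omega) (by omega) x]
          constructor
          · rintro (rfl | ⟨q, hq, haq, hqF, hqn, rfl⟩)
            · exact ⟨a, hap, le_refl a, by omega, by omega, rfl⟩
            · exact ⟨q, hq, by omega, hqF, hqn, rfl⟩
          · rintro ⟨q, hq, haq, hqF, hqn, rfl⟩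
            by_cases hqa : q = a
            · left; rw [hqa]
            · right; exact ⟨q, hq, by omega, hqF, hqn, rfl⟩
    · rw [if_neg hap]
      rw [ih (a+1) (by omega) (by omega) (by omega) x]
      constructor
      · rintro ⟨q, hq, haq, hqF, hqn, rfl⟩
        exact ⟨q, hq, by omega, hqF, hqn, rfl⟩
      · rintro ⟨q, hq, haq, hqF, hqn, rfl⟩
        have hqa : q ≠ a := by
          rintro rfl; rw [hq] at hap; exact hap rfl
        exact ⟨q, hq, by omega, hqF, hqn, rfl⟩

-- one outer iteration i adds exactly the marks {q*i : q prime ≤ minFac i, q*i ≤ N}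
theorem pvMarkStepNat (m i N : Nat) (hi : 2 ≤ i) (hm : m ≤ N) :
    ((2 ≤ m ∧ ¬ m.Prime ∧ m / m.minFac ≤ i - 1) ∨
     (∃ q : Nat, q.Prime ∧ q ≤ i.minFac ∧ q * i ≤ N ∧ m = q * i))
    ↔ (2 ≤ m ∧ ¬ m.Prime ∧ m / m.minFac ≤ i) := by
  constructor
  · rintro (⟨h1, h2, h3⟩ | ⟨q, hq, hqF, hqN, rfl⟩)
    · exact ⟨h1, h2, by omega⟩
    · have hq2 : 2 ≤ q := hq.two_le
      have h2m : 2 ≤ q * i := by nlinarith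
      have hqd : q ∣ q * i := Dvd.intro i rfl
      have hmin : (q * i).minFac = q := by
        have le1 : (q * i).minFac ≤ q := Nat.minFac_le_of_dvd hq2 hqd
        have hp : Nat.Prime (q * i).minFac := Nat.minFac_prime (by omega)
        have hd : (q * i).minFac ∣ q * i := Nat.minFac_dvd _
        rcases (Nat.Prime.dvd_mul hp).mp hd with h | h
        · exact ((Nat.prime_dvd_prime_iff_eq hp hq).mp h)
        · have := Nat.minFac_le_of_dvd hp.two_le h
          omega
      have hnp : ¬ (q * i).Prime := by
        intro hp
        rcases (Nat.Prime.eq_one_or_self_of_dvd hp q hqd) with h | h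
        · omega
        · nlinarith
      refine ⟨h2m, hnp, ?_⟩
      rw [hmin, Nat.mul_div_cancel_left i (by omega)]
  · rintro ⟨h1, h2, h3⟩
    by_cases h4 : m / m.minFac ≤ i - 1
    · exact Or.inl ⟨h1, h2, h4⟩
    · right
      have hq : m.minFac.Prime := Nat.minFac_prime (by omega)
      have hdvd : m.minFac ∣ m := Nat.minFac_dvd m
      have heq : m / m.minFac = i := by omega
      have hmeq : m = m.minFac * i := by
        rw [← heq, Nat.mul_div_cancel' hdvd]
      have hidvd : i ∣ m := by rw [hmeq]; exact dvd_mul_left i m.minFac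
      have hiF : i.minFac ∣ m := dvd_trans (Nat.minFac_dvd i) hidvd
      have : m.minFac ≤ i.minFac := Nat.minFac_le_of_dvd (Nat.minFac_prime (by omega)).two_le hiF
      exact ⟨m.minFac, hq, this, by omega, hmeq⟩

-- a composite m is marked before iteration m is reached (its cofactor is smaller)
theorem pvDivLt (m : Nat) (h : 2 ≤ m) : m / m.minFac < m :=
  Nat.div_lt_self (by omega) (Nat.minFac_prime (by omega)).one_lt

-- nothing is marked before the first iteration
theorem pvDivGeTwo (m : Nat) (h2 : 2 ≤ m) (hnp : ¬ m.Prime) : 2 ≤ m / m.minFac := by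
  have := Nat.minFac_le_div (by omega) hnp
  have := (Nat.minFac_prime (show m ≠ 1 by omega)).two_le
  omega

theorem pvMarked_step {n I : Int} (h2 : 2 ≤ I) (hIn : I ≤ n) (x : Int)
    (hx0 : 0 ≤ x) (hxn : x ≤ n) :
    (pvMarked (I-1) x || (pvMarkList n I (pvPrimesTo I)).contains x) = pvMarked I x := by
  have hIN : (2:Nat) ≤ I.toNat := by omega
  have hF2 : 2 ≤ I.toNat.minFac := (Nat.minFac_prime (by omega)).two_le
  have hmem := pvMarkList_mem (n := n) (i := I) h2
    (((I.toNat.minFac : Int) - 2).toNat) 2 (by omega) (by omega) rfl x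
  have key := pvMarkStepNat x.toNat I.toNat n.toNat (by omega) (by omega)
  unfold pvMarked
  rw [show pvPrimesTo I = (PySem.List.pyRange 2 (I+1) 1).filter pvIsP from rfl]
  rw [Bool.eq_iff_iff]
  simp only [Bool.or_eq_true, decide_eq_true_eq, List.contains_iff_mem]
  rw [hmem]
  obtain ⟨dq, hdq⟩ : ∃ dq, x.toNat / x.toNat.minFac = dq := ⟨_, rfl⟩
  rw [hdq] at key ⊢
  clear hmem hdq
  constructor
  · rintro (⟨ha, hb, hc⟩ | ⟨q, hq, h2q, hqF, hqn, hxq⟩)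
    · have e1 : 2 ≤ x.toNat := by omega
      have e2 : dq ≤ I.toNat - 1 := by omega
      have := key.mp (Or.inl ⟨e1, hb, e2⟩)
      exact ⟨by omega, this.2.1, by omega⟩
    · have hqP : Nat.Prime q.toNat := by simpa [pvIsP] using hq
      have hmul : ((q.toNat * I.toNat : Nat) : Int) = q * I := by
        push_cast
        rw [Int.toNat_of_nonneg (by omega), Int.toNat_of_nonneg (by omega)]
      have e1 : q.toNat ≤ I.toNat.minFac := by omega
      have e2 : q.toNat * I.toNat ≤ n.toNat := by omega
      have e3 : x.toNat = q.toNat * I.toNat := by omega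
      have := key.mp (Or.inr ⟨q.toNat, hqP, e1, e2, e3⟩)
      exact ⟨by omega, this.2.1, by omega⟩
  · rintro ⟨ha, hb, hc⟩
    have e1 : 2 ≤ x.toNat := by omega
    have e2 : dq ≤ I.toNat := by omega
    rcases key.mpr ⟨e1, hb, e2⟩ with ⟨h1', h2', h3'⟩ | ⟨qn, hqp, hqF, hqn, hxq⟩
    · left; exact ⟨by omega, hb, by omega⟩
    · right
      have hmul : ((qn * I.toNat : Nat) : Int) = (qn : Int) * I := by
        push_cast
        rw [Int.toNat_of_nonneg (by omega)]
      exact ⟨(qn : Int), by simp [pvIsP, hqp], by exact_mod_cast hqp.two_le,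
        by omega, by omega, by omega⟩

theorem mem_pvPrimesTo {I p : Int} :
    p ∈ pvPrimesTo I ↔ 2 ≤ p ∧ p < I + 1 ∧ Nat.Prime p.toNat := by
  simp [pvPrimesTo, List.mem_filter, PySem.List.mem_pyRange_one, pvIsP, and_assoc]

theorem pairwise_pvPrimesTo (I : Int) : (pvPrimesTo I).Pairwise (· < ·) :=
  (PySem.List.pairwise_lt_pyRange_one 2 (I+1)).filter _

theorem pvPrimesTo_succ {I : Int} (h : 2 ≤ I) :
    pvPrimesTo I = pvPrimesTo (I-1) ++ (if pvIsP I then [I] else []) := by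
  unfold pvPrimesTo
  have h1 : (I - 1) + 1 = I := by omega
  rw [h1]
  rw [show PySem.List.pyRange 2 (I+1) 1 = PySem.List.pyRange 2 I 1 ++ [I] from
    PySem.List.pyRange_one_succ_right (by omega)]
  rw [List.filter_append]
  congr 1
  by_cases h2 : pvIsP I <;> simp [h2]

theorem pvFoldA_inv (n : Int) (_hn : 2 ≤ n) :
    ∀ (k : Nat) (I : Int), 1 ≤ I → I ≤ n → (I - 1).toNat = k →
    (PySem.List.pyRange 2 (I+1) 1).foldl (pvStepA n) ([], pvMask n (fun _ => false)) =
      (pvPrimesTo I, pvMask n (pvMarked I)) := by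
  intro k
  induction k with
  | zero =>
    intro I h1 hIn hk
    have hI : I = 1 := by omega
    subst hI
    rw [PySem.List.pyRange_one_eq_nil (by omega)]
    simp only [List.foldl_nil]
    rw [Prod.mk.injEq]
    constructor
    · unfold pvPrimesTo
      rw [PySem.List.pyRange_one_eq_nil (by omega)]
      rfl
    · apply pvMask_congr
      intro x hx0 hxn
      unfold pvMarked
      symm
      simp only [decide_eq_false_iff_not]
      rintro ⟨a, b, c⟩
      have := pvDivGeTwo x.toNat (by omega) b
      omega
  | succ k ih =>
    intro I h1 hIn hk
    have hI2 : 2 ≤ I := by omega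
    rw [show PySem.List.pyRange 2 (I+1) 1 = PySem.List.pyRange 2 I 1 ++ [I] from
      PySem.List.pyRange_one_succ_right (by omega)]
    rw [List.foldl_append]
    rw [show PySem.List.pyRange 2 I 1 = PySem.List.pyRange 2 ((I-1)+1) 1 from by norm_num]
    rw [ih (I-1) (by omega) (by omega) (by omega)]
    simp only [List.foldl_cons, List.foldl_nil]
    unfold pvStepA
    simp only []
    -- the queried entry: is_prime[I] ≠ 0 ↔ I is prime
    rw [pyGetD_pvMask (pvMarked (I-1)) (by omega) (by omega)]
    have hquery : pvMarked (I-1) I = decide (¬ Nat.Prime I.toNat) := by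
      unfold pvMarked
      rw [decide_eq_decide]
      constructor
      · rintro ⟨a, b, c⟩; exact b
      · intro hb
        refine ⟨by omega, hb, ?_⟩
        have := pvDivLt I.toNat (by omega)
        omega
    have hprimes : (if (if pvMarked (I-1) I then (0:Int) else 1) ≠ 0
        then pvPrimesTo (I-1) ++ [I] else pvPrimesTo (I-1)) = pvPrimesTo I := by
      rw [pvPrimesTo_succ hI2, hquery]
      by_cases hp : Nat.Prime I.toNat
      · simp [hp, pvIsP]
      · simp [hp, pvIsP]
    rw [hprimes]
    rw [Prod.mk.injEq]
    constructor
    · rfl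
    · rw [pvInnerA_mask hI2 (pvPrimesTo I) (pvMarked (I-1))
        (fun p hp => (mem_pvPrimesTo.mp hp).1)]
      apply pvMask_congr
      intro x hx0 hxn
      exact pvMarked_step hI2 (by omega) x hx0 hxn

theorem pvNoSmall_iff (i : Int) (l : List Int) (h2 : ∀ p ∈ l, 2 ≤ p)
    (hs : l.Pairwise (· < ·)) :
    pvNoSmallFactor i l = true ↔ ∀ p ∈ l, p * p ≤ i → ¬ (p ∣ i) := by
  induction l with
  | nil => simp [pvNoSmallFactor]
  | cons p ps ih =>
    have hp2 : 2 ≤ p := h2 p (by simp)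
    have hlt : ∀ q ∈ ps, p < q := fun q hq => (List.pairwise_cons.mp hs).1 q hq
    have hps : ps.Pairwise (· < ·) := (List.pairwise_cons.mp hs).2
    by_cases h1 : p * p > i
    · simp only [pvNoSmallFactor, if_pos h1]
      constructor
      · intro _ q hq hqq
        rcases List.mem_cons.mp hq with rfl | hq'
        · omega
        · have := hlt q hq'
          nlinarith
      · intro _; trivial
    · by_cases hd : PySem.Int.mod i p = 0
      · simp only [pvNoSmallFactor, if_neg h1, if_pos hd]
        constructor
        · intro h; cases h
        · intro h
          exfalso
          exact h p (by simp) (by omega) ((PySem.Int.mod_eq_zero_iff_dvd i p).mp hd)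
      · simp only [pvNoSmallFactor, if_neg h1, if_neg hd]
        rw [ih (fun q hq => h2 q (by simp [hq])) hps]
        constructor
        · intro h q hq hqq
          rcases List.mem_cons.mp hq with rfl | hq'
          · intro hdvd
            exact hd ((PySem.Int.mod_eq_zero_iff_dvd i q).mpr hdvd)
          · exact h q hq' hqq
        · intro h q hq hqq
          exact h q (by simp [hq]) hqq

theorem pvPrimeIff (i : Int) (hi : 2 ≤ i) :
    (∀ p : Int, 2 ≤ p → p < i → Nat.Prime p.toNat → p * p ≤ i → ¬ p ∣ i) ↔
      Nat.Prime i.toNat := by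
  constructor
  · intro h
    by_contra hnp
    set q := i.toNat.minFac with hq
    have hqp : Nat.Prime q := Nat.minFac_prime (by omega)
    have hq2 : 2 ≤ q := hqp.two_le
    have hqq : q * q ≤ i.toNat := by
      have h := Nat.minFac_sq_le_self (n := i.toNat) (by omega) hnp
      rw [pow_two] at h
      exact h
    have hqlt : q < i.toNat := by nlinarith
    have hdvdN : q ∣ i.toNat := Nat.minFac_dvd _
    apply h (q : Int) (by exact_mod_cast hq2) (by omega) (by simp [hqp]) ?_ ?_
    · have : ((q * q : Nat) : Int) ≤ ((i.toNat : Nat) : Int) := by exact_mod_cast hqq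
      push_cast at this
      omega
    · have h1 : i = (i.toNat : Int) := by omega
      rw [h1]
      exact_mod_cast hdvdN
  · intro hp p hp2 hpi hppr _ hdvd
    have hdvdN : p.toNat ∣ i.toNat := by
      have h1 : p = (p.toNat : Int) := by omega
      have h2 : i = (i.toNat : Int) := by omega
      rw [h1, h2] at hdvd
      exact_mod_cast hdvd
    rcases hp.eq_one_or_self_of_dvd p.toNat hdvdN with h | h <;> omega

theorem pvNoSmall_primes (i : Int) (hi : 2 ≤ i) :
    pvNoSmallFactor i (pvPrimesTo (i-1)) = pvIsP i := by
  have h1 := pvNoSmall_iff i (pvPrimesTo (i-1))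
    (fun p hp => (mem_pvPrimesTo.mp hp).1) (pairwise_pvPrimesTo _)
  have h2 : (∀ p ∈ pvPrimesTo (i-1), p * p ≤ i → ¬ (p ∣ i)) ↔ Nat.Prime i.toNat := by
    rw [← pvPrimeIff i hi]
    constructor
    · intro h p hp2 hpi hppr hpp
      exact h p (mem_pvPrimesTo.mpr ⟨hp2, by omega, hppr⟩) hpp
    · intro h p hp hpp
      rcases mem_pvPrimesTo.mp hp with ⟨a, b, c⟩
      exact h p a (by omega) c hpp
  unfold pvIsP
  cases hb : pvNoSmallFactor i (pvPrimesTo (i-1)) with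
  | false =>
    have hnp : ¬ Nat.Prime i.toNat := by
      intro hp
      have ht := h1.mpr (h2.mpr hp)
      rw [hb] at ht
      cases ht
    simp [hnp]
  | true => simp [h2.mp (h1.mp hb)]

theorem pvFoldB_inv : ∀ (k : Nat) (I : Int), 1 ≤ I → (I - 1).toNat = k →
    (PySem.List.pyRange 2 (I+1) 1).foldl
      (fun primes i => if pvNoSmallFactor i primes then primes ++ [i] else primes) [] =
      pvPrimesTo I := by
  intro k
  induction k with
  | zero =>
    intro I h1 hk
    have hI : I = 1 := by omega
    subst hI
    rw [PySem.List.pyRange_one_eq_nil (by omega)]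
    unfold pvPrimesTo
    rw [PySem.List.pyRange_one_eq_nil (by omega)]
    rfl
  | succ k ih =>
    intro I h1 hk
    have hI2 : 2 ≤ I := by omega
    rw [show PySem.List.pyRange 2 (I+1) 1 = PySem.List.pyRange 2 I 1 ++ [I] from
      PySem.List.pyRange_one_succ_right (by omega)]
    rw [List.foldl_append]
    rw [show PySem.List.pyRange 2 I 1 = PySem.List.pyRange 2 ((I-1)+1) 1 from by norm_num]
    rw [ih (I-1) (by omega) (by omega)]
    simp only [List.foldl_cons, List.foldl_nil]
    rw [pvNoSmall_primes I hI2, pvPrimesTo_succ hI2]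
    by_cases h : pvIsP I <;> simp [h]

-- index shift for A's pair loop
theorem pvGetD_cons_pos (x : Int) (l : List Int) (i : Int) (d : Int) (h : 1 ≤ i) :
    PySem.List.pyGetD (x :: l) i d = PySem.List.pyGetD l (i-1) d := by
  obtain ⟨m, hm⟩ : ∃ m : Nat, i = (m : Int) + 1 := ⟨(i-1).toNat, by omega⟩
  subst hm
  rw [show ((m:Int) + 1 - 1) = (m:Int) from by omega, PySem.List.pyGetD_natCast]
  rw [show ((m:Int) + 1) = ((m+1 : Nat) : Int) from by push_cast; ring,
    PySem.List.pyGetD_natCast]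
  exact List.getD_cons_succ

theorem pvShift (f : Int → Bool) (x : Int) (l : List Int) :
    ∀ (k : Nat) (a b c : Int), 1 ≤ a → (b - a).toNat = k →
    (PySem.List.pyRange (a+1) (b+1) 1).foldl
      (fun cnt i => if f (PySem.List.pyGetD (x::l) (i-1) 0 + PySem.List.pyGetD (x::l) i 0 + 1)
                    then cnt + 1 else cnt) c =
    (PySem.List.pyRange a b 1).foldl
      (fun cnt i => if f (PySem.List.pyGetD l (i-1) 0 + PySem.List.pyGetD l i 0 + 1)
                    then cnt + 1 else cnt) c := by
  intro k
  induction k with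
  | zero =>
    intro a b c ha hk
    rw [PySem.List.pyRange_one_eq_nil (by omega), PySem.List.pyRange_one_eq_nil (by omega)]
    rfl
  | succ k ih =>
    intro a b c ha hk
    rw [PySem.List.pyRange_one_cons (by omega : a + 1 < b + 1),
        PySem.List.pyRange_one_cons (by omega : a < b)]
    simp only [List.foldl_cons]
    rw [show a + 1 - 1 = a from by omega]
    rw [pvGetD_cons_pos x l a 0 (by omega), pvGetD_cons_pos x l (a+1) 0 (by omega)]
    rw [show a + 1 - 1 = a from by omega]
    exact ih (a+1) b _ (by omega) (by omega)

theorem pvPhase2 (f : Int → Bool) :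
    ∀ (l : List Int) (c : Int),
    (PySem.List.pyRange 1 (l.length : Int) 1).foldl
      (fun cnt i => if f (PySem.List.pyGetD l (i-1) 0 + PySem.List.pyGetD l i 0 + 1)
                    then cnt + 1 else cnt) c =
    (l.zip (l.drop 1)).foldl
      (fun cnt ab => cnt + (if f (ab.1 + ab.2 + 1) then (1:Int) else 0)) c := by
  intro l
  induction l with
  | nil => intro c; simp [PySem.List.pyRange_one_eq_nil]
  | cons x t ih =>
    intro c
    cases t with
    | nil => simp [PySem.List.pyRange_one_eq_nil]
    | cons y t' =>
      have hlen : ((x :: y :: t').length : Int) = (t'.length : Int) + 2 := by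
        simp; omega
      rw [hlen]
      rw [PySem.List.pyRange_one_cons (by omega : (1:Int) < (t'.length : Int) + 2)]
      simp only [List.foldl_cons]
      have hget0 : PySem.List.pyGetD (x :: y :: t') ((1:Int)-1) 0 = x := by
        norm_num [PySem.List.pyGetD_zero_cons]
      have hget1 : PySem.List.pyGetD (x :: y :: t') (1:Int) 0 = y := by
        rw [pvGetD_cons_pos x (y :: t') 1 0 (by omega)]
        norm_num [PySem.List.pyGetD_zero_cons]
      rw [hget0, hget1]
      have hsh := pvShift f x (y :: t') ((t'.length : Int) + 1 - 1).toNat 1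
        ((t'.length : Int) + 1) (if f (x + y + 1) then c + 1 else c) (by omega) rfl
      rw [show ((t'.length : Int) + 2) = ((t'.length : Int) + 1) + 1 from by omega]
      rw [hsh]
      have hlen2 : ((y :: t').length : Int) = (t'.length : Int) + 1 := by simp
      rw [← hlen2, ih]
      simp only [List.zip, List.zipWith_cons_cons, List.drop_succ_cons, List.drop_zero,
        List.foldl_cons]
      congr 1
      by_cases hf : f (x + y + 1) <;> simp [hf]

-- ===== VERDICT (by name: the statement is the Claim_ definition above) =====
theorem func_spec : Claim_equal_func := by
  intro n k _
  unfold Spec_func func func_alt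
  by_cases hn : n ≤ 1
  · rw [PySem.List.pyRange_one_eq_nil (by omega : n + 1 ≤ 2)]
    simp [PySem.List.pyRange_one_eq_nil]
  · have hn2 : 2 ≤ n := by omega
    have hinit : (PySem.List.pyRange 0 (n+1) 1).map (fun _ => (1:Int)) =
        pvMask n (fun _ => false) := by
      simp [pvMask]
    rw [hinit]
    rw [pvFoldA_inv n hn2 (n-1).toNat n (by omega) (by omega) rfl]
    rw [pvFoldB_inv (n-1).toNat n (by omega) rfl]
    simp only []
    rw [pvPhase2 (fun v => PySem.Set.contains (PySem.Set.ofList (pvPrimesTo n)) v)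
      (pvPrimesTo n) 0]
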